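-- pv_equiv track=rewrite | github.com/w4nderwaffe/AOIS | LAB2/src/zhegalkin.py | build_difference_triangle
-- ===== SOURCE A (Python) =====
-- def build_difference_triangle(values: list[int]) -> list[list[int]]:
--     if len(values) == 0:
--         return []
--
--     triangle: list[list[int]] = [values[:]]
--     current = values[:]
--
--     while len(current) > 1:
--         next_row: list[int] = []
--         for index in range(len(current) - 1):
--             next_row.append(current[index] ^ current[index + 1])
--         triangle.append(next_row)
--         current = next_row
--
--     return triangle
-- ===== SOURCE B (Python) =====
-- def build_difference_triangle(values: list[int]) -> list[list[int]]:
--     def rows(current: list[int]) -> list[list[int]]: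
--         if len(current) == 0:
--             return []
--         if len(current) <= 1:
--             return [current]
--         next_row = [x ^ y for x, y in zip(current, current[1:])]
--         return [current] + rows(next_row)
--     return rows(values[:])
-- ===== Notes on version B (the rewrite author's own statement) =====
-- stated objective: alternative
-- what changed: Replaces the while-loop with a triangle accumulator and an index-based inner append loop by a recursive rows helper that pairs each element with its successor via zip and prepends the current row.
import Mathlib
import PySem

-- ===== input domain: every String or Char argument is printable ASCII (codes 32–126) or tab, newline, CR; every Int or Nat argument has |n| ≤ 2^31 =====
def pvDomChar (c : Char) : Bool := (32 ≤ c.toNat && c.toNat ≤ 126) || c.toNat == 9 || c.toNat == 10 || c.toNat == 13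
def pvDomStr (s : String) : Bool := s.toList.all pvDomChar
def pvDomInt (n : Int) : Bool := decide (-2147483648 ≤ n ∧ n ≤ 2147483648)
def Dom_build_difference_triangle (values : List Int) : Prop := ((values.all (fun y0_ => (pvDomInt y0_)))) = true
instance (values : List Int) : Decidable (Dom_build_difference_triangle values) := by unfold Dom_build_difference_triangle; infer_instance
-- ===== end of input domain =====

-- ===== PORT A =====
-- One honest line: B replaces A's while-loop + index-append inner loop by a recursive
-- rows helper using zip over adjacent pairs (alternative decomposition, same cost).

-- inner for-loop of A: next_row built by appending current[i] ^ current[i+1]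
def pvANext (current : List Int) : List Int :=
  (PySem.List.pyRange 0 ((current.length : Int) - 1) 1).foldl
    (fun acc i => acc ++ [PySem.Int.bxor (PySem.List.pyGetD current i 0) (PySem.List.pyGetD current (i + 1) 0)]) []

-- used by the port's termination proof
theorem pvANext_length (current : List Int) :
    (pvANext current).length = current.length - 1 := by
  unfold pvANext
  rw [PySem.List.foldl_append_singleton_eq_map]
  simp [PySem.List.length_pyRange_one]

-- the while-loop of A
def pvALoop (triangle : List (List Int)) (current : List Int) : List (List Int) :=
  if current.length > 1 then
    pvALoop (triangle ++ [pvANext current]) (pvANext current)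
  else triangle
termination_by current.length
decreasing_by rw [pvANext_length]; omega

def build_difference_triangle (values : List Int) : List (List Int) :=
  if values.length = 0 then []
  else pvALoop [values] values

-- ===== PORT B =====
def pvBRows (current : List Int) : List (List Int) :=
  if current.length = 0 then []
  else if current.length <= 1 then [current]
  else
    current ::
      pvBRows (List.zipWith (fun x y => PySem.Int.bxor x y) current (PySem.List.slice current (some 1) none))
termination_by current.length
decreasing_by simp [PySem.List.slice_from_one]; omega

def build_difference_triangle_alt (values : List Int) : List (List Int) :=
  pvBRows values

-- ===== PRECONDITION & SPEC =====
def Spec_build_difference_triangle (values : List Int) (out : List (List Int)) : Prop := out = build_difference_triangle_alt values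
instance (values : List Int) (out : List (List Int)) : Decidable (Spec_build_difference_triangle values out) := by unfold Spec_build_difference_triangle; infer_instance

-- ===== CLAIM (what is proved, stated in full; the proofs are below) =====
def Claim_equal_build_difference_triangle : Prop := ∀ (values : List Int), Dom_build_difference_triangle values → Spec_build_difference_triangle values (build_difference_triangle values)

-- ===== LEMMAS AND PROOFS =====

-- A's inner loop computes exactly B's adjacent-pair zipWith
theorem range_map_eq_zipWith (c : List Int) :
    (List.range (c.length - 1)).map (fun k => PySem.Int.bxor (c.getD k 0) (c.getD (k + 1) 0))
      = List.zipWith (fun x y => PySem.Int.bxor x y) c c.tail := by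
  induction c with
  | nil => simp
  | cons a t ih =>
    cases t with
    | nil => simp
    | cons b r =>
      rw [show (a :: b :: r).length - 1 = ((b :: r).length - 1) + 1 by simp,
        List.range_succ_eq_map, List.map_cons, List.map_map]
      simp only [List.getD_cons_zero, List.getD_cons_succ, List.zipWith, List.tail_cons]
      refine congrArg₂ _ rfl ?_
      simpa using ih

theorem pvANext_eq (c : List Int) :
    pvANext c = List.zipWith (fun x y => PySem.Int.bxor x y) c c.tail := by
  unfold pvANext
  rw [PySem.List.foldl_append_singleton_eq_map, PySem.List.pyRange_one]
  rw [show ((c.length : Int) - 1 - 0).toNat = c.length - 1 by omega]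
  rw [← range_map_eq_zipWith c]
  simp only [List.nil_append, List.map_map]
  refine List.map_congr_left (fun k hk => ?_)
  simp only [Function.comp_apply, zero_add]
  have h2 := PySem.List.pyGetD_natCast c (k + 1) (0 : Int)
  push_cast at h2
  simp [h2, List.getD_eq_getElem?_getD]

theorem pvBRows_head (c : List Int) (h : c ≠ []) :
    pvBRows c = c :: (pvBRows c).tail := by
  rw [pvBRows]
  split_ifs with h0 h1
  · exact absurd (List.eq_nil_of_length_eq_zero h0) h
  · rfl
  · rfl

theorem pvALoop_eq (c : List Int) (t : List (List Int)) :
    pvALoop t c = t ++ (pvBRows c).tail := by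
  by_cases h : c.length > 1
  · rw [pvALoop]
    simp only [h, if_true]
    have hlen : (pvANext c).length = c.length - 1 := pvANext_length c
    have := pvALoop_eq (pvANext c) (t ++ [pvANext c])
    rw [this]
    have hne : pvANext c ≠ [] := by
      intro he; rw [he] at hlen; simp at hlen; omega
    conv_rhs => rw [pvBRows]
    have h0 : ¬ c.length = 0 := by omega
    have h1 : ¬ c.length ≤ 1 := by omega
    simp only [h0, h1, if_false, List.tail_cons]
    rw [PySem.List.slice_from_one, ← pvANext_eq]
    rw [pvBRows_head (pvANext c) hne]
    simp
  · rw [pvALoop]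
    simp only [h, if_false]
    rw [pvBRows]
    split_ifs with h0 h1
    · simp
    · simp
    · omega
termination_by c.length
decreasing_by rw [pvANext_length]; omega

-- ===== VERDICT (by name: the statement is the Claim_ definition above) =====
theorem build_difference_triangle_spec : Claim_equal_build_difference_triangle := by
  intro values _
  unfold Spec_build_difference_triangle build_difference_triangle build_difference_triangle_alt
  split_ifs with h0
  · rw [List.eq_nil_of_length_eq_zero h0, pvBRows]; simp
  · have hne : values ≠ [] := by intro he; rw [he] at h0; exact h0 rfl
    rw [pvALoop_eq, pvBRows_head values hne]
    simp [← pvBRows_head values hne]
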